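-- pv_equiv track=rewrite | github.com/Xinglab/CLAM | CLAM/utils/parseBAM.py | get_align_block
-- ===== SOURCE A (Python) =====
-- BAM_CMATCH = 0  # M
--
-- BAM_CDEL = 2  # D
--
-- BAM_CREF_SKIP = 3  # N
--
-- def get_align_block(cigartuples=[], ref_start=0):
--     align_block = []
--     start = ref_start
--     end = ref_start - 1
--     for tuples in cigartuples:
--         if tuples[0] == BAM_CMATCH or tuples[0] == BAM_CDEL:
--             end += tuples[1]
--         elif tuples[0] == BAM_CREF_SKIP:
--             align_block.append((start, end))
--             start = end + tuples[1] + 1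
--             end = start -1
--     align_block.append((start, end))
--
--     return align_block
-- ===== SOURCE B (Python) =====
-- def get_align_block(cigartuples=[], ref_start=0):
--     # Pass 1: collapse the cigar into segment lengths (sum of M/D runs) and skip lengths (N).
--     segments = []
--     skips = []
--     cur = 0
--     for op, length in cigartuples:
--         if op == 0 or op == 2:
--             cur += length
--         elif op == 3:
--             segments.append(cur)
--             skips.append(length)
--             cur = 0
--     # Pass 2: lay the segments out on the reference.
--     blocks = []
--     start = ref_start
--     for seg, skip in zip(segments, skips):
--         blocks.append((start, start + seg - 1))
--         start += seg + skip
--     blocks.append((start, start + cur - 1))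
--     return blocks
-- ===== Notes on version B (the rewrite author's own statement) =====
-- stated objective: alternative
-- what changed: A threads start/end coordinates through a single stateful loop over the cigar; B first collapses the cigar into segment/skip length lists and then lays them out on the reference in a second zip pass.
import Mathlib
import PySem

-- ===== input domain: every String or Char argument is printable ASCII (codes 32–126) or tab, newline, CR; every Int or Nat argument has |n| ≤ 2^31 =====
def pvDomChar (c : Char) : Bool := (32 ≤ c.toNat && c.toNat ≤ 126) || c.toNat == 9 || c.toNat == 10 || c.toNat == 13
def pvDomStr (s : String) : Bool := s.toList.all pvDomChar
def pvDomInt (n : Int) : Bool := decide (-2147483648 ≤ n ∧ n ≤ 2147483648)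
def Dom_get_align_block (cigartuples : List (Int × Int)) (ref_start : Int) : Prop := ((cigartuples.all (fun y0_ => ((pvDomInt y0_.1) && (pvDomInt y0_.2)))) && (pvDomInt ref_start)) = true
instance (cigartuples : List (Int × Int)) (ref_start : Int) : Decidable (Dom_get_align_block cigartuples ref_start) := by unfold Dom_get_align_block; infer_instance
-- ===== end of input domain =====

-- B replaces A's single stateful coordinate loop by two passes: collapse the cigar into
-- segment/skip length lists, then lay the segments out on the reference (alternative decomposition).


-- ===== PORT A =====
-- A's loop: state (align_block, start, end), branch order as in the Python.
def goA (ts : List (Int × Int)) (acc : List (Int × Int)) (start e : Int) : List (Int × Int) :=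
  match ts with
  | [] => acc ++ [(start, e)]
  | t :: rest =>
    if t.1 = 0 ∨ t.1 = 2 then goA rest acc start (e + t.2)
    else if t.1 = 3 then goA rest (acc ++ [(start, e)]) (e + t.2 + 1) (e + t.2)
    else goA rest acc start e

def get_align_block (cigartuples : List (Int × Int)) (ref_start : Int) : List (Int × Int) :=
  goA cigartuples [] ref_start (ref_start - 1)

-- ===== PORT B =====
-- Pass 1: collapse the cigar into (segments, skips, trailing current length).
def pass1 (ts : List (Int × Int)) : List Int × List Int × Int :=
  ts.foldl (fun st t =>
    if t.1 = 0 ∨ t.1 = 2 then (st.1, st.2.1, st.2.2 + t.2)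
    else if t.1 = 3 then (st.1 ++ [st.2.2], st.2.1 ++ [t.2], 0)
    else st) ([], [], 0)

-- Pass 2: lay out the zipped (segment, skip) pairs; state (blocks, start).
def pass2 (ps : List (Int × Int)) (st : List (Int × Int) × Int) : List (Int × Int) × Int :=
  ps.foldl (fun st p => (st.1 ++ [(st.2, st.2 + p.1 - 1)], st.2 + p.1 + p.2)) st

def get_align_block_alt (cigartuples : List (Int × Int)) (ref_start : Int) : List (Int × Int) :=
  let s := pass1 cigartuples
  let r := pass2 (s.1.zip s.2.1) ([], ref_start)
  r.1 ++ [(r.2, r.2 + s.2.2 - 1)]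

-- ===== PRECONDITION & SPEC =====
def Spec_get_align_block (cigartuples : List (Int × Int)) (ref_start : Int) (out : List (Int × Int)) : Prop := out = get_align_block_alt cigartuples ref_start
instance (cigartuples : List (Int × Int)) (ref_start : Int) (out : List (Int × Int)) : Decidable (Spec_get_align_block cigartuples ref_start out) := by unfold Spec_get_align_block; infer_instance

-- ===== CLAIM (what is proved, stated in full; the proofs are below) =====
def Claim_equal_get_align_block : Prop := ∀ (cigartuples : List (Int × Int)) (ref_start : Int), Dom_get_align_block cigartuples ref_start → Spec_get_align_block cigartuples ref_start (get_align_block cigartuples ref_start)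

-- ===== LEMMAS AND PROOFS =====
theorem pass2_append (ps : List (Int × Int)) (p : Int × Int) (st : List (Int × Int) × Int) :
    pass2 (ps ++ [p]) st =
      ((pass2 ps st).1 ++ [((pass2 ps st).2, (pass2 ps st).2 + p.1 - 1)],
        (pass2 ps st).2 + p.1 + p.2) := by
  simp [pass2, List.foldl_append]

-- Key invariant: running A's loop from a pass2-laid-out prefix equals
-- finishing pass1 from (segs, skips, cur) and then laying everything out.
theorem key (ts : List (Int × Int)) (segs skips : List Int) (cur : Int)
    (h : segs.length = skips.length) (bs : List (Int × Int)) (s : Int) :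
    (let f := ts.foldl (fun st t =>
        if t.1 = 0 ∨ t.1 = 2 then (st.1, st.2.1, st.2.2 + t.2)
        else if t.1 = 3 then (st.1 ++ [st.2.2], st.2.1 ++ [t.2], 0)
        else st) (segs, skips, cur)
     let r := pass2 (f.1.zip f.2.1) (bs, s)
     r.1 ++ [(r.2, r.2 + f.2.2 - 1)])
    = goA ts (pass2 (segs.zip skips) (bs, s)).1 (pass2 (segs.zip skips) (bs, s)).2
        ((pass2 (segs.zip skips) (bs, s)).2 + cur - 1) := by
  induction ts generalizing segs skips cur with
  | nil => simp [goA]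
  | cons t rest ih =>
    by_cases h02 : t.1 = 0 ∨ t.1 = 2
    · simp only [List.foldl_cons, goA, if_pos h02]
      have := ih segs skips (cur + t.2) h
      simp only at this ⊢
      rw [this]
      congr 1
      omega
    · by_cases h3 : t.1 = 3
      · simp only [List.foldl_cons, goA, if_neg h02, if_pos h3]
        have := ih (segs ++ [cur]) (skips ++ [t.2]) 0 (by simp [h])
        simp only at this ⊢
        rw [this, List.zip_append h]
        simp only [List.zip_cons_cons, List.zip_nil_right, pass2_append]
        congr 1 <;> omega
      · simp only [List.foldl_cons, goA, if_neg h02, if_neg h3]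
        exact ih segs skips cur h

-- ===== VERDICT (by name: the statement is the Claim_ definition above) =====
theorem get_align_block_spec : Claim_equal_get_align_block := by
  intro ts r _
  have h := key ts [] [] 0 rfl [] r
  show goA ts [] r (r - 1) = _
  have e : r - 1 = r + 0 - 1 := by ring
  rw [e]
  exact h.symm
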